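-- pv_equiv track=rewrite | github.com/pujab21/FFCS-TIMETABLE-GENERATOR | main__ui__and__algorithm.py | priority_order
-- ===== SOURCE A (Python) =====
-- def priority_order(d):
--     p = dict()
--     for i in d:
--         k,v = i,d[i]
--         try:
--             p[v].append(k)
--         except:
--             p[v] = [k,]
--     d = dict(sorted(p.items(),reverse = True))
--     return d
-- ===== SOURCE B (Python) =====
-- def priority_order(d):
--     p = {}
--     for k, v in sorted(d.items(), key=lambda kv: kv[1], reverse=True):
--         p.setdefault(v, []).append(k)
--     return p
-- ===== Notes on version B (the rewrite author's own statement) =====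
-- stated objective: alternative
-- what changed: B inverts the phase order: instead of grouping keys by value into a dict and then sorting the grouped items, B stably sorts the items by value descending first and then builds the result dict in one grouping pass with setdefault, so no post-sort of the dict is needed.
import Mathlib
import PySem

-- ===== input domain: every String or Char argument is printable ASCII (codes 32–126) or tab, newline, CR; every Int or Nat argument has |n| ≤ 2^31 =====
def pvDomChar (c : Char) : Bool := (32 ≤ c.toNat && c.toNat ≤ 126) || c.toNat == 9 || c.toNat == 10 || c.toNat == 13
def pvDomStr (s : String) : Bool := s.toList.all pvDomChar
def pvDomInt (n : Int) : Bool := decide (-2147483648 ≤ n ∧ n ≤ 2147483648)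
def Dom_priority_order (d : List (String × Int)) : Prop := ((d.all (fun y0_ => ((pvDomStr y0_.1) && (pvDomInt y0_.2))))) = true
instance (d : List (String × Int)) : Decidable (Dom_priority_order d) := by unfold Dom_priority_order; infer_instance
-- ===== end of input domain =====

-- B inverts A's phase order: A groups keys by value into a dict then sorts the grouped items
-- descending; B stably sorts the items by value descending first and groups in one pass (alternative, same cost).


-- ===== PORT A =====
-- for i in d: k,v = i, d[i]; try p[v].append(k) except p[v] = [k]; then dict(sorted(p.items(), reverse=True)).
-- Python's sorted compares the (value, list) tuples; the keys of p are pairwise distinct, so the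
-- comparison is decided by the first component — ported as a sort keyed on the first component.
def priority_order (d : List (String × Int)) : List (Int × List String) :=
  PySem.List.sorted
    ((d.foldl (fun p i =>
        match p.get? i.2 with
        | some lst => p.insert i.2 (lst ++ [i.1])   -- try: p[v].append(k)
        | none     => p.insert i.2 [i.1])           -- except: p[v] = [k,]
      PySem.Dict.empty).items)
    (fun kv => kv.1) true

-- ===== PORT B =====
-- for k, v in sorted(d.items(), key=lambda kv: kv[1], reverse=True): p.setdefault(v, []).append(k)
-- (setdefault-then-append-in-place is exactly Dict.modify with default [])
def priority_order_alt (d : List (String × Int)) : List (Int × List String) :=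
  ((PySem.List.sorted d (fun kv => kv.2) true).foldl
      (fun p kv => p.modify kv.2 [] (fun lst => lst ++ [kv.1]))
      PySem.Dict.empty).items

-- ===== PRECONDITION & SPEC =====
def Spec_priority_order (d : List (String × Int)) (out : List (Int × List String)) : Prop := out = priority_order_alt d
instance (d : List (String × Int)) (out : List (Int × List String)) : Decidable (Spec_priority_order d out) := by unfold Spec_priority_order; infer_instance

-- ===== CLAIM (what is proved, stated in full; the proofs are below) =====
def Claim_equal_priority_order : Prop := ∀ (d : List (String × Int)), Dom_priority_order d → Spec_priority_order d (priority_order d)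

-- ===== LEMMAS AND PROOFS =====

-- the common grouping fold (B's shape)
def pvGroup (l : List (String × Int)) : PySem.Dict Int (List String) :=
  l.foldl (fun p kv => p.modify kv.2 [] (fun lst => lst ++ [kv.1])) PySem.Dict.empty

-- keys of a pair with a given value, in list order
def pvVals (l : List (String × Int)) (v : Int) : List String :=
  (l.filter (fun p => p.2 == v)).map (fun p => p.1)

-- A's try/except step is exactly Dict.modify
lemma pvStepA_eq_modify (p : PySem.Dict Int (List String)) (i : String × Int) :
    (match p.get? i.2 with
     | some lst => p.insert i.2 (lst ++ [i.1])
     | none     => p.insert i.2 [i.1]) = p.modify i.2 [] (fun lst => lst ++ [i.1]) := by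
  cases h : p.get? i.2 with
  | none => simp [PySem.Dict.modify, PySem.Dict.getD_eq_get?_getD, h]
  | some lst => simp [PySem.Dict.modify, PySem.Dict.getD_eq_get?_getD, h]

lemma pvGroupA_eq (l : List (String × Int)) :
    (l.foldl (fun p i =>
        match p.get? i.2 with
        | some lst => p.insert i.2 (lst ++ [i.1])
        | none     => p.insert i.2 [i.1])
      PySem.Dict.empty) = pvGroup l := by
  unfold pvGroup
  exact PySem.List.foldl_congr_mem l _ _ _ (fun acc x _ => pvStepA_eq_modify acc x)

lemma pvGroup_keys (l : List (String × Int)) :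
    (pvGroup l).keys = PySem.List.dedup (l.map (fun p => p.2)) := by
  unfold pvGroup
  rw [PySem.Dict.keys_foldl_modify_key l (fun kv => kv.2) [] (fun _ kv => fun lst => lst ++ [kv.1])]
  simp [PySem.Dict.keys_empty, PySem.List.dedup_eq_ofList, PySem.Set.update, PySem.Set.ofList_eq_foldl]

lemma pvGroup_keys_nodup (l : List (String × Int)) : (pvGroup l).keys.Nodup := by
  rw [pvGroup_keys]; exact PySem.List.nodup_dedup _

lemma pvGroup_getD (l : List (String × Int)) (v : Int) :
    (pvGroup l).getD v [] = pvVals l v := by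
  unfold pvGroup
  have h : (l.map Prod.swap).foldl (fun p q => p.modify q.1 [] (fun lst => lst ++ [q.2])) PySem.Dict.empty
      = l.foldl (fun p kv => p.modify kv.2 [] (fun lst => lst ++ [kv.1])) PySem.Dict.empty := by
    rw [List.foldl_map]
    rfl
  rw [← h, PySem.Dict.getD_foldl_modify_append]
  unfold pvVals
  simp [List.filter_map, Function.comp_def, Prod.swap]

lemma pvGroup_items (l : List (String × Int)) :
    (pvGroup l).items
      = (PySem.List.dedup (l.map (fun p => p.2))).map (fun v => (v, pvVals l v)) := by
  rw [PySem.Dict.items_eq_map_keys _ (pvGroup_keys_nodup l) [], pvGroup_keys]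
  exact List.map_congr_left (fun v _ => by rw [pvGroup_getD])

-- ---- stability of the descending sort under filtering on the key ----

lemma pvInsertBy_pairwise (x : String × Int) (ys : List (String × Int))
    (h : ys.Pairwise (fun a b => b.2 ≤ a.2)) :
    (PySem.List.insertBy (fun a b => decide (b.2 < a.2)) x ys).Pairwise (fun a b => b.2 ≤ a.2) := by
  induction ys with
  | nil => simp [PySem.List.insertBy]
  | cons y t ih =>
    rw [List.pairwise_cons] at h
    by_cases hb : y.2 < x.2
    · have : PySem.List.insertBy (fun a b => decide (b.2 < a.2)) x (y :: t) = x :: y :: t := by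
        simp [PySem.List.insertBy, hb]
      rw [this, List.pairwise_cons]
      exact ⟨fun z hz => by
        rcases List.mem_cons.mp hz with h1 | h2
        · exact le_of_lt (h1 ▸ hb)
        · exact le_of_lt (lt_of_le_of_lt (h.1 z h2) hb),
        List.pairwise_cons.mpr h⟩
    · have : PySem.List.insertBy (fun a b => decide (b.2 < a.2)) x (y :: t)
          = y :: PySem.List.insertBy (fun a b => decide (b.2 < a.2)) x t := by
        simp [PySem.List.insertBy, hb]
      rw [this, List.pairwise_cons]
      refine ⟨fun z hz => ?_, ih h.2⟩
      rcases (PySem.List.mem_insertBy _ _ _ _).mp hz with h1 | h2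
      · exact h1 ▸ le_of_not_gt hb
      · exact h.1 z h2

lemma pvFilter_insertBy_ne (bf : (String × Int) → (String × Int) → Bool) (v : Int)
    (x : String × Int) (hx : ¬ x.2 = v) (ys : List (String × Int)) :
    (PySem.List.insertBy bf x ys).filter (fun p => p.2 == v)
      = ys.filter (fun p => p.2 == v) := by
  induction ys with
  | nil => simp [PySem.List.insertBy, hx]
  | cons y t ih =>
    by_cases hb : bf x y
    · simp [PySem.List.insertBy, hb, hx]
    · simp only [PySem.List.insertBy, hb, Bool.false_eq_true, if_false, List.filter_cons]
      rw [ih]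

lemma pvFilter_insertBy_eq (v : Int) (x : String × Int) (hx : x.2 = v)
    (ys : List (String × Int)) (h : ys.Pairwise (fun a b => b.2 ≤ a.2)) :
    (PySem.List.insertBy (fun a b => decide (b.2 < a.2)) x ys).filter (fun p => p.2 == v)
      = ys.filter (fun p => p.2 == v) ++ [x] := by
  induction ys with
  | nil => simp [PySem.List.insertBy, hx]
  | cons y t ih =>
    rw [List.pairwise_cons] at h
    by_cases hb : y.2 < x.2
    · have hins : PySem.List.insertBy (fun a b => decide (b.2 < a.2)) x (y :: t) = x :: y :: t := by
        simp [PySem.List.insertBy, hb]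
      have hy : ¬ (y.2 = v) := by omega
      have hnil : (y :: t).filter (fun p => p.2 == v) = [] := by
        rw [List.filter_eq_nil_iff]
        intro z hz
        rcases List.mem_cons.mp hz with h1 | h2
        · simp [h1, hy]
        · have : z.2 ≤ y.2 := h.1 z h2
          have : ¬ (z.2 = v) := by omega
          simp [this]
      rw [hins, List.filter_cons, hnil]
      simp [hx]
    · have hins : PySem.List.insertBy (fun a b => decide (b.2 < a.2)) x (y :: t)
          = y :: PySem.List.insertBy (fun a b => decide (b.2 < a.2)) x t := by
        simp [PySem.List.insertBy, hb]
      rw [hins, List.filter_cons, List.filter_cons, ih h.2]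
      by_cases hy : (y.2 == v) <;> simp [hy]

lemma pvFoldl_insertBy_filter (v : Int) :
    ∀ (xs acc : List (String × Int)), acc.Pairwise (fun a b => b.2 ≤ a.2) →
    (xs.foldl (fun acc x => PySem.List.insertBy (fun a b => decide (b.2 < a.2)) x acc) acc).filter (fun p => p.2 == v)
      = acc.filter (fun p => p.2 == v) ++ xs.filter (fun p => p.2 == v) := by
  intro xs
  induction xs with
  | nil => intro acc _; simp
  | cons x xs ih =>
    intro acc hacc
    have hpair := pvInsertBy_pairwise x acc hacc
    rw [List.foldl_cons, ih _ hpair, List.filter_cons]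
    by_cases hx : x.2 = v
    · rw [pvFilter_insertBy_eq v x hx acc hacc]
      simp [hx]
    · rw [pvFilter_insertBy_ne _ v x hx acc]
      simp [hx]

lemma pvSorted_filter (l : List (String × Int)) (v : Int) :
    (PySem.List.sorted l (fun p => p.2) true).filter (fun p => p.2 == v)
      = l.filter (fun p => p.2 == v) := by
  rw [PySem.List.sorted_rev_eq_foldl_insertBy]
  simpa using pvFoldl_insertBy_filter v l [] List.Pairwise.nil

lemma pvVals_sorted (l : List (String × Int)) (v : Int) :
    pvVals (PySem.List.sorted l (fun p => p.2) true) v = pvVals l v := by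
  unfold pvVals; rw [pvSorted_filter]

-- ---- dedup of a list is a sublist of it ----

lemma pvFoldl_add_sublist (l : List Int) : ∀ (s : List Int),
    ∃ t, l.foldl PySem.Set.add s = s ++ t ∧ t.Sublist l := by
  induction l with
  | nil => exact fun s => ⟨[], by simp, List.Sublist.refl _⟩
  | cons x l ih =>
    intro s
    by_cases hc : x ∈ s
    · obtain ⟨t, h1, h2⟩ := ih s
      exact ⟨t, by simpa [PySem.Set.add, hc] using h1, h2.cons _⟩
    · obtain ⟨t, h1, h2⟩ := ih (s ++ [x])
      exact ⟨x :: t, by simpa [PySem.Set.add, hc] using h1, h2.cons₂ _⟩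

lemma pvDedup_sublist (l : List Int) : (PySem.List.dedup l).Sublist l := by
  obtain ⟨t, h1, h2⟩ := pvFoldl_add_sublist l []
  simpa [PySem.List.dedup_eq_ofList, PySem.Set.ofList_eq_foldl, h1] using h2

-- ---- main proof ----

-- ===== VERDICT (by name: the statement is the Claim_ definition above) =====
theorem priority_order_spec : Claim_equal_priority_order := by
  intro d _
  unfold Spec_priority_order priority_order priority_order_alt
  rw [pvGroupA_eq]
  have halt : ((PySem.List.sorted d (fun kv => kv.2) true).foldl
      (fun p kv => p.modify kv.2 [] (fun lst => lst ++ [kv.1]))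
      PySem.Dict.empty).items
      = (pvGroup (PySem.List.sorted d (fun kv => kv.2) true)).items := rfl
  rw [halt, pvGroup_items, pvGroup_items]
  set s := PySem.List.sorted d (fun kv : String × Int => kv.2) true with hs
  have hvals : (PySem.List.dedup (s.map (fun p => p.2))).map (fun v => (v, pvVals s v))
      = (PySem.List.dedup (s.map (fun p => p.2))).map (fun v => (v, pvVals d v)) :=
    List.map_congr_left (fun v _ => by rw [hs, pvVals_sorted])
  rw [hvals]
  apply PySem.List.sorted_rev_eq_of_perm_of_pairwise_gt
  · apply List.Perm.map
    rw [List.perm_ext_iff_of_nodup (PySem.List.nodup_dedup _) (PySem.List.nodup_dedup _)]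
    intro v
    simp [PySem.List.mem_sorted, hs]
  · rw [List.pairwise_map]
    have h1 : (s.map (fun p : String × Int => p.2)).Pairwise (fun a b => b ≤ a) := by
      rw [List.pairwise_map]
      exact PySem.List.sorted_pairwise_rev d (fun p => p.2)
    have h2 := h1.sublist (pvDedup_sublist _)
    have h3 : (PySem.List.dedup (s.map (fun p : String × Int => p.2))).Pairwise (fun a b => a ≠ b) :=
      PySem.List.nodup_dedup _
    exact (h2.and h3).imp (fun {a b} h => lt_of_le_of_ne h.1 (Ne.symm h.2))
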